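-- pv_equiv track=rewrite | github.com/Kblz13/CodigosClases | Largo Lista Recursion.py | largolista
-- ===== SOURCE A (Python) =====
-- def largolista(lista):
--     if isinstance(lista,list):
--         if lista==[]:
--             return 0
--         else:
--             return 1+largolista(lista[1:])
--     else:
--         return "La lista debe ser una lista"
-- ===== SOURCE B (Python) =====
-- def largolista(lista):
--     if not isinstance(lista, list):
--         return "La lista debe ser una lista"
--     n = 0
--     for _ in lista:
--         n += 1
--     return n
-- ===== Notes on version B (the rewrite author's own statement) =====
-- stated objective: simpler
-- what changed: Replaces the list-slicing recursion with an iterative counting loop (n += 1 per element), avoiding O(n^2) slice copies.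
import Mathlib
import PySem

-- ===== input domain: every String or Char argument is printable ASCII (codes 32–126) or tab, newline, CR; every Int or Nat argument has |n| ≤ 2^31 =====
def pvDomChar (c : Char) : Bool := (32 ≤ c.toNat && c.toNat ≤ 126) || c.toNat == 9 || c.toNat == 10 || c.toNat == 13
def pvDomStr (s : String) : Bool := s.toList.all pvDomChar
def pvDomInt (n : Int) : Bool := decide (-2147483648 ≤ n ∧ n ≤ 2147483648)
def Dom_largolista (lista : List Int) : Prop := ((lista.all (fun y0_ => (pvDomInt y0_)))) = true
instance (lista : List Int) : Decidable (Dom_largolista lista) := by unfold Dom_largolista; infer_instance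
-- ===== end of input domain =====

-- B replaces A's slice-based recursion with an iterative counting loop; return-value port
-- (the argument is always a list here, so the isinstance branch never fires).

-- ===== PORT A =====
-- A: if lista == []: return 0 else return 1 + largolista(lista[1:])
def largolista (lista : List Int) : Int :=
  if lista = [] then 0
  else 1 + largolista (PySem.List.slice lista (some 1) none)
decreasing_by
  simp [PySem.List.slice_from_one]
  cases lista with
  | nil => simp_all
  | cons a t => simp

-- ===== PORT B =====
-- B: n = 0; for _ in lista: n += 1; return n
def largolista_alt (lista : List Int) : Int :=
  lista.foldl (fun n _ => n + 1) 0

-- ===== PRECONDITION & SPEC =====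
def Spec_largolista (lista : List Int) (out : Int) : Prop := out = largolista_alt lista
instance (lista : List Int) (out : Int) : Decidable (Spec_largolista lista out) := by unfold Spec_largolista; infer_instance

-- ===== CLAIM (what is proved, stated in full; the proofs are below) =====
def Claim_equal_largolista : Prop := ∀ (lista : List Int), Dom_largolista lista → Spec_largolista lista (largolista lista)

-- ===== LEMMAS AND PROOFS =====
theorem largolista_alt_foldl (lista : List Int) (n : Int) :
    lista.foldl (fun n _ => n + 1) n = n + lista.length := by
  induction lista generalizing n with
  | nil => simp
  | cons a t ih => simp [List.foldl, ih]; omega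

theorem largolista_eq_length (lista : List Int) : largolista lista = lista.length := by
  induction lista with
  | nil => simp [largolista]
  | cons a t ih =>
    rw [largolista]
    simp [PySem.List.slice_from_one, ih]
    omega

-- ===== VERDICT (by name: the statement is the Claim_ definition above) =====
theorem largolista_spec : Claim_equal_largolista := by
  intro lista _
  unfold Spec_largolista largolista_alt
  rw [largolista_eq_length, largolista_alt_foldl]
  simp
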